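-- pv_equiv track=rewrite | github.com/liskos/jakov | вариант 2024 2025/ЕГКР 19.04 !!!!!!!!!!!!!!!!!!!!!!/26_2.py | func
-- ===== SOURCE A (Python) =====
-- def func(a):
--     a = sorted(a)
--     chet = [x for x in a if x % 2 == 0]
--     nechet = [x for x in a if x % 2 == 1]
--     t = 1
--     m = 1
--     for i in range(1, len(chet)):
--         if chet[i] - 2 == chet[i-1]:
--             t += 1
--             m = max(m, t)
--         else:
--             t = 1
--     t = 1
--     for i in range(1, len(nechet)):
--         if nechet[i] - 2 == nechet[i-1]:
--             t += 1
--             m = max(m, t)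
--         else:
--             t = 1
--     return m
-- ===== SOURCE B (Python) =====
-- def func(a):
--     m = 1
--     pe = po = None
--     te = to = 1
--     for x in sorted(a):
--         if x % 2 == 0:
--             te = te + 1 if pe is not None and x - 2 == pe else 1
--             m = max(m, te)
--             pe = x
--         else:
--             to = to + 1 if po is not None and x - 2 == po else 1
--             m = max(m, to)
--             po = x
--     return m
-- ===== Notes on version B (the rewrite author's own statement) =====
-- stated objective: alternative
-- what changed: Replaces A's construction of two filtered lists plus two separate index-based loops with a single pass over the sorted list that keeps per-parity (previous value, run length) state and one global maximum.
import Mathlib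
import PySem

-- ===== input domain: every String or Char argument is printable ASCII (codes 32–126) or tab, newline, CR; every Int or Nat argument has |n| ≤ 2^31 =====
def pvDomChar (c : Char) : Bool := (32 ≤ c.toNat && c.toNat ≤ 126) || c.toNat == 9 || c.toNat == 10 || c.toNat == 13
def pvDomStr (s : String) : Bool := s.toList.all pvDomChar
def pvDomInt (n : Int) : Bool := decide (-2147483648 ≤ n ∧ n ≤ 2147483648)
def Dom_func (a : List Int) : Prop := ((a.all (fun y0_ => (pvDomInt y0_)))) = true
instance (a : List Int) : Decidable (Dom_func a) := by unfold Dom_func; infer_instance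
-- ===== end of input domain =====

-- B replaces A's two filtered lists and two index loops by one pass over the sorted list
-- keeping per-parity (previous value, run length) state; objective: alternative single pass.

-- ===== PORT A =====
def func (a : List Int) : Int :=
  let s := PySem.List.sorted a (fun x => x)
  let chet := s.filter (fun x => PySem.Int.mod x 2 == 0)
  let nechet := s.filter (fun x => PySem.Int.mod x 2 == 1)
  let tm1 := (PySem.List.pyRange 1 (chet.length : Int)).foldl
    (fun (tm : Int × Int) i =>
      if PySem.List.pyGetD chet i 0 - 2 = PySem.List.pyGetD chet (i - 1) 0 then
        (tm.1 + 1, max tm.2 (tm.1 + 1))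
      else (1, tm.2)) (1, 1)
  let tm2 := (PySem.List.pyRange 1 (nechet.length : Int)).foldl
    (fun (tm : Int × Int) i =>
      if PySem.List.pyGetD nechet i 0 - 2 = PySem.List.pyGetD nechet (i - 1) 0 then
        (tm.1 + 1, max tm.2 (tm.1 + 1))
      else (1, tm.2)) (1, tm1.2)
  tm2.2

-- ===== PORT B =====
def func_alt (a : List Int) : Int :=
  let st := (PySem.List.sorted a (fun x => x)).foldl
    (fun (st : (Option Int × Int) × (Option Int × Int) × Int) x =>
      let pe := st.1.1; let te := st.1.2
      let po := st.2.1.1; let t_o := st.2.1.2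
      let m := st.2.2
      if PySem.Int.mod x 2 = 0 then
        let te' := match pe with
          | some p => if x - 2 = p then te + 1 else 1
          | none => 1
        ((some x, te'), (po, t_o), max m te')
      else
        let to' := match po with
          | some p => if x - 2 = p then t_o + 1 else 1
          | none => 1
        ((pe, te), (some x, to'), max m to'))
    ((none, 1), (none, 1), 1)
  st.2.2

-- ===== PRECONDITION & SPEC =====
def Spec_func (a : List Int) (out : Int) : Prop := out = func_alt a
instance (a : List Int) (out : Int) : Decidable (Spec_func a out) := by unfold Spec_func; infer_instance

-- ===== CLAIM (what is proved, stated in full; the proofs are below) =====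
def Claim_equal_func : Prop := ∀ (a : List Int), Dom_func a → Spec_func a (func a)

-- ===== LEMMAS AND PROOFS =====

-- one-parity run processor: B's per-parity step, iterated along one list
def pvRun : Option Int → Int → Int → List Int → Int × Int
  | _, t, m, [] => (t, m)
  | p?, t, m, x :: rest =>
    let t' := match p? with
      | some p => if x - 2 = p then t + 1 else 1
      | none => 1
    pvRun (some x) t' (max m t') rest

lemma pvRun_max (l : List Int) : ∀ (p : Option Int) (t a b : Int),
    (pvRun p t (max a b) l).2 = max a (pvRun p t b l).2 := by
  induction l with
  | nil => intro p t a b; simp [pvRun]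
  | cons x rest ih =>
    intro p t a b
    simp only [pvRun]
    rw [max_assoc, ih]

lemma pvRun_mono (l : List Int) : ∀ (p : Option Int) (t m : Int),
    m ≤ (pvRun p t m l).2 := by
  induction l with
  | nil => intro p t m; simp [pvRun]
  | cons x rest ih =>
    intro p t m
    simp only [pvRun]
    exact le_trans (le_max_left m _) (ih _ _ _)

lemma pvGetD_cons_succ (x : Int) (l : List Int) (i : Int) (d : Int) (h : 0 ≤ i) :
    PySem.List.pyGetD (x :: l) (i + 1) d = PySem.List.pyGetD l i d := by
  simp only [PySem.List.pyGetD, PySem.List.pyGet?, PySem.List.pyIdx?, List.length_cons]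
  by_cases hlt : i < (l.length : Int)
  · have h1 : 0 ≤ i + 1 := by omega
    have h2 : i + 1 < ((l.length : Int) + 1) := by omega
    simp only [h, hlt, h1, h2, if_true, push_cast]
    have : (i + 1).toNat = i.toNat + 1 := by omega
    simp [this]
  · have h2 : ¬ (i + 1 < ((l.length : Int) + 1)) := by omega
    simp [h, hlt, h2, show (0:Int) ≤ i + 1 by omega]

-- shift an index fold down by one
lemma pvFold_shift {β : Type} (a b : Int) (f : β → Int → β) (init : β) :
    (PySem.List.pyRange (a + 1) (b + 1)).foldl f init
      = (PySem.List.pyRange a b).foldl (fun acc j => f acc (j + 1)) init := by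
  rw [PySem.List.pyRange_one (a+1) (b+1), PySem.List.pyRange_one a b, List.foldl_map,
    List.foldl_map]
  have hb : b + 1 - (a + 1) = b - a := by ring
  rw [hb]
  apply PySem.List.foldl_congr_mem
  intro acc k _
  have : a + 1 + (k : Int) = a + k + 1 := by ring
  rw [this]

-- A's index loop over x :: rest equals the run processor started at prev = x
lemma pvIdx_cons (rest : List Int) : ∀ (x t m : Int), 1 ≤ m →
    (PySem.List.pyRange 1 ((x :: rest).length : Int)).foldl
      (fun (tm : Int × Int) i =>
        if PySem.List.pyGetD (x :: rest) i 0 - 2 = PySem.List.pyGetD (x :: rest) (i - 1) 0 then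
          (tm.1 + 1, max tm.2 (tm.1 + 1))
        else (1, tm.2)) (t, m)
      = pvRun (some x) t m rest := by
  induction rest with
  | nil =>
    intro x t m _
    simp [PySem.List.pyRange_one_eq_nil, pvRun]
  | cons y rest' ih =>
    intro x t m hm
    have hlen : ((x :: y :: rest').length : Int) = (rest'.length : Int) + 2 := by
      simp; ring
    rw [hlen, PySem.List.pyRange_one_cons (by omega)]
    simp only [List.foldl_cons]
    have hx0 : PySem.List.pyGetD (x :: y :: rest') (1:Int) 0 = y := by
      have := pvGetD_cons_succ x (y :: rest') 0 0 (by omega)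
      simpa [PySem.List.pyGetD_zero_cons] using this
    have hx1 : PySem.List.pyGetD (x :: y :: rest') ((1:Int) - 1) 0 = x := by
      norm_num [PySem.List.pyGetD_zero_cons]
    rw [hx0, hx1]
    have hshift : ((rest'.length : Int) + 2) = (((rest'.length : Int) + 1) + 1) := by ring
    have hbody : ∀ (tm : Int × Int),
        (PySem.List.pyRange (1 + 1) ((rest'.length : Int) + 2)).foldl
          (fun (tm : Int × Int) i =>
            if PySem.List.pyGetD (x :: y :: rest') i 0 - 2
                = PySem.List.pyGetD (x :: y :: rest') (i - 1) 0 then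
              (tm.1 + 1, max tm.2 (tm.1 + 1))
            else (1, tm.2)) tm
        = (PySem.List.pyRange 1 (((y :: rest').length : Int))).foldl
          (fun (tm : Int × Int) i =>
            if PySem.List.pyGetD (y :: rest') i 0 - 2
                = PySem.List.pyGetD (y :: rest') (i - 1) 0 then
              (tm.1 + 1, max tm.2 (tm.1 + 1))
            else (1, tm.2)) tm := by
      intro tm
      rw [hshift]
      rw [pvFold_shift 1 ((rest'.length : Int) + 1)]
      have hlen2 : (((y :: rest').length : Int)) = (rest'.length : Int) + 1 := by simp
      rw [hlen2]
      apply PySem.List.foldl_congr_mem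
      intro acc j hj
      have hj' := PySem.List.mem_pyRange_one.mp hj
      have e1 : PySem.List.pyGetD (x :: y :: rest') (j + 1) 0
          = PySem.List.pyGetD (y :: rest') j 0 := pvGetD_cons_succ _ _ _ _ (by omega)
      have e2 : PySem.List.pyGetD (x :: y :: rest') (j + 1 - 1) 0
          = PySem.List.pyGetD (y :: rest') (j - 1) 0 := by
        have : j + 1 - 1 = (j - 1) + 1 := by ring
        rw [this]
        exact pvGetD_cons_succ _ _ _ _ (by omega)
      rw [e1, e2]
    by_cases hc : y - 2 = x
    · rw [if_pos hc, hbody, ih y (t + 1) (max m (t + 1)) (le_trans hm (le_max_left _ _))]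
      simp [pvRun, hc]
    · rw [if_neg hc, hbody, ih y 1 m hm]
      have : max m 1 = m := by omega
      simp [pvRun, hc, this]

-- A's whole loop (initial t = 1) equals pvRun from an empty prev
lemma pvIdx_loop (l : List Int) (m : Int) (hm : 1 ≤ m) :
    (PySem.List.pyRange 1 (l.length : Int)).foldl
      (fun (tm : Int × Int) i =>
        if PySem.List.pyGetD l i 0 - 2 = PySem.List.pyGetD l (i - 1) 0 then
          (tm.1 + 1, max tm.2 (tm.1 + 1))
        else (1, tm.2)) (1, m)
      = pvRun none 1 m l := by
  cases l with
  | nil => simp [PySem.List.pyRange_one_eq_nil, pvRun]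
  | cons x rest =>
    rw [pvIdx_cons rest x 1 m hm]
    have : max m 1 = m := by omega
    simp [pvRun, this]

-- B's interleaved pass equals the two independent per-parity runs
lemma pvInterleave (l : List Int) : ∀ (pe po : Option Int) (te t_o m : Int),
    ((l.foldl
      (fun (st : (Option Int × Int) × (Option Int × Int) × Int) x =>
        if PySem.Int.mod x 2 = 0 then
          let te' := match st.1.1 with
            | some p => if x - 2 = p then st.1.2 + 1 else 1
            | none => 1
          ((some x, te'), (st.2.1.1, st.2.1.2), max st.2.2 te')
        else
          let to' := match st.2.1.1 with
            | some p => if x - 2 = p then st.2.1.2 + 1 else 1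
            | none => 1
          ((st.1.1, st.1.2), (some x, to'), max st.2.2 to'))
      ((pe, te), (po, t_o), m)).2.2)
      = (pvRun po t_o
          (pvRun pe te m (l.filter (fun x => PySem.Int.mod x 2 == 0))).2
          (l.filter (fun x => !(PySem.Int.mod x 2 == 0)))).2 := by
  induction l with
  | nil => intro pe po te t_o m; simp [pvRun]
  | cons x rest ih =>
    intro pe po te t_o m
    by_cases hx : PySem.Int.mod x 2 = 0
    · simp only [List.foldl_cons, List.filter_cons, hx, if_pos, beq_iff_eq]
      rw [ih]
      simp [pvRun]
    · simp only [List.foldl_cons, List.filter_cons, hx, beq_iff_eq, if_false]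
      rw [ih, if_pos (by simp only [Bool.not_eq_true', beq_eq_false_iff_ne]; exact hx)]
      simp only [pvRun]
      rw [max_comm m, pvRun_max]
      rw [max_comm (pvRun pe te m (List.filter (fun x => PySem.Int.mod x 2 == 0) rest)).2]

-- Python's x % 2 is 0 or 1, so A's "odd" filter is B's else branch
lemma pvFilter_odd (l : List Int) :
    l.filter (fun x => PySem.Int.mod x 2 == 1)
      = l.filter (fun x => !(PySem.Int.mod x 2 == 0)) := by
  apply List.filter_congr
  intro x _
  show (PySem.Int.mod x 2 == 1) = !(PySem.Int.mod x 2 == 0)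
  rcases PySem.Int.mod_two_eq x with h | h <;> rw [h] <;> rfl

-- ===== VERDICT (by name: the statement is the Claim_ definition above) =====
theorem func_spec : Claim_equal_func := by
  intro a _
  unfold Spec_func func func_alt
  simp only []
  set s := PySem.List.sorted a (fun x => x) with hs
  rw [pvFilter_odd]
  rw [pvIdx_loop _ 1 le_rfl]
  rw [pvIdx_loop _ _ (le_trans le_rfl (pvRun_mono _ _ _ _))]
  rw [pvInterleave s none none 1 1 1]
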